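-- pv_equiv track=rewrite | github.com/hamza-mughees/Google-foo.bar | Python Solutions/Free the Bunny Prisoners.py | solution
-- ===== SOURCE A (Python) =====
-- import itertools
--
-- def solution(num_buns, num_required):
--     buns_list = [i for i in range(num_buns)]
--
--     bunny_key_assign = list(itertools.combinations(buns_list, num_buns - num_required + 1))
--     # (num_buns C (num_buns - num_required + 1))
--     # the first index of this array (bunny_key_assign)
--     # would be a key represented as an array of bunnies to
--     # which the key is assigned
--
--     num_keys = len(bunny_key_assign)
--
--     final_list = [[] for i in range(num_buns)]
--
--     for a_key in range(num_keys):
--         for bunny_to_give_key in bunny_key_assign[a_key]: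
--             final_list[bunny_to_give_key].append(a_key)
--
--     return final_list
-- ===== SOURCE B (Python) =====
-- import itertools
--
-- def solution(num_buns, num_required):
--     combos = list(itertools.combinations(range(num_buns), num_buns - num_required + 1))
--     return [[j for j, combo in enumerate(combos) if i in combo]
--             for i in range(num_buns)]
-- ===== Notes on version B (the rewrite author's own statement) =====
-- stated objective: simpler
-- what changed: A scatters each key index into per-bunny accumulator lists (outer loop over keys, in-place appends); B transposes the pass: it builds the same combination list once and, per bunny, gathers by membership the indices of combinations containing that bunny, with no mutable accumulator.
import Mathlib
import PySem

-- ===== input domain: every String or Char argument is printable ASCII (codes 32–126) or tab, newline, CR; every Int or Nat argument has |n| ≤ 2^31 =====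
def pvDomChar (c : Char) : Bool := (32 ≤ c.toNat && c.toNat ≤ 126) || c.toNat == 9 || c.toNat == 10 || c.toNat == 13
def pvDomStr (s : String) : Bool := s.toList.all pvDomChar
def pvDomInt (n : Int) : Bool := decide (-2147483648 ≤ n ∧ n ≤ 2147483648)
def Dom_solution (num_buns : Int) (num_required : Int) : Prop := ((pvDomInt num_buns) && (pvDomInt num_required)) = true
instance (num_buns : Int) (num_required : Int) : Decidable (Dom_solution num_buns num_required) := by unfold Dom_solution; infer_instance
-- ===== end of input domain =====

-- B transposes A's key-scatter loop into a per-bunny gather over the same combination list (simpler decomposition, same cost class).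

-- ===== PORT A =====
-- itertools.combinations(xs, k) in lexicographic order (shared helper: A calls the
-- library; B's python builds the identical list with the same library call)
def pvCombinations (xs : List Int) (k : Nat) : List (List Int) :=
  if xs.length < k then []  -- itertools yields nothing at all when r > len(pool)
  else match xs, k with
  | _, 0 => [[]]
  | [], _ + 1 => []
  | x :: rest, k + 1 =>
      (pvCombinations rest k).map (fun c => x :: c) ++ pvCombinations rest (k + 1)

def solution (num_buns : Int) (num_required : Int) : List (List Int) :=
  let buns_list := PySem.List.pyRange 0 num_buns 1
  let bunny_key_assign := pvCombinations buns_list (num_buns - num_required + 1).toNat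
  let num_keys : Int := bunny_key_assign.length
  let final_list := (PySem.List.pyRange 0 num_buns 1).map (fun _ => ([] : List Int))
  (PySem.List.pyRange 0 num_keys 1).foldl
    (fun fl a_key =>
      (PySem.List.pyGetD bunny_key_assign a_key []).foldl
        (fun fl2 b => fl2.modify b.toNat (fun ks => ks ++ [a_key])) fl)
    final_list

-- ===== PORT B =====
def solution_alt (num_buns : Int) (num_required : Int) : List (List Int) :=
  let combos := pvCombinations (PySem.List.pyRange 0 num_buns 1) (num_buns - num_required + 1).toNat
  (PySem.List.pyRange 0 num_buns 1).map (fun i =>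
    (PySem.List.enumerate combos 0).filterMap
      (fun jc => if i ∈ jc.2 then some jc.1 else none))

-- ===== PRECONDITION & SPEC =====
-- Pre_ excludes num_required > num_buns + 1, where itertools.combinations gets a
-- negative r and A (and B alike) raises ValueError.
def Pre_solution (num_buns : Int) (num_required : Int) : Prop :=
  0 ≤ num_buns - num_required + 1
instance (num_buns : Int) (num_required : Int) : Decidable (Pre_solution num_buns num_required) := by unfold Pre_solution; infer_instance
def pvWitness_solution : Int × Int := (4, 3)

def Spec_solution (num_buns : Int) (num_required : Int) (out : List (List Int)) : Prop := out = solution_alt num_buns num_required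
instance (num_buns : Int) (num_required : Int) (out : List (List Int)) : Decidable (Spec_solution num_buns num_required out) := by unfold Spec_solution; infer_instance

-- ===== CLAIM (what is proved, stated in full; the proofs are below) =====
def Claim_equal_solution : Prop := ∀ (num_buns : Int) (num_required : Int), Dom_solution num_buns num_required → Pre_solution num_buns num_required → Spec_solution num_buns num_required (solution num_buns num_required)

-- ===== LEMMAS AND PROOFS =====

-- every member of pvCombinations xs k is a sublist of xs
lemma pvCombinations_sublist :
    ∀ (xs : List Int) (k : Nat) (c : List Int), c ∈ pvCombinations xs k → c.Sublist xs := by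
  intro xs
  induction xs with
  | nil =>
      intro k c hc
      cases k with
      | zero => simp [pvCombinations] at hc; simp [hc]
      | succ k => simp [pvCombinations] at hc
  | cons x rest ih =>
      intro k c hc
      rw [pvCombinations.eq_def] at hc
      split at hc
      · simp at hc
      · cases k with
        | zero => simp at hc; simp [hc]
        | succ k =>
            simp only [List.mem_append, List.mem_map] at hc
            rcases hc with ⟨c', hc', rfl⟩ | hc
            · exact (ih k c' hc').cons₂ x
            · exact (ih (k + 1) c hc).cons x

-- applying one combination's appends, observed at index i
lemma get_inner (c : List Int) (j : Int) (fl : List (List Int))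
    (hnd : c.Nodup) (hpos : ∀ b ∈ c, 0 ≤ b) (i : Nat) :
    (c.foldl (fun fl2 b => fl2.modify b.toNat (fun ks => ks ++ [j])) fl)[i]? =
      if (i : Int) ∈ c then fl[i]?.map (fun ks => ks ++ [j]) else fl[i]? := by
  induction c generalizing fl with
  | nil => simp
  | cons b cs ih =>
      simp only [List.foldl_cons]
      rw [ih _ (List.Nodup.of_cons hnd) (fun x hx => hpos x (List.mem_cons_of_mem b hx))]
      have hb : 0 ≤ b := hpos b (List.mem_cons_self ..)
      by_cases hbi : b = (i : Int)
      · have hbn : b.toNat = i := by omega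
        have hni : (i : Int) ∉ cs := by
          subst hbi; exact (List.nodup_cons.mp hnd).1
        simp [hbi, hni]
      · have hbn : b.toNat ≠ i := by omega
        have : (i : Int) ∈ b :: cs ↔ (i : Int) ∈ cs := by
          constructor
          · intro h
            rcases List.mem_cons.mp h with h | h
            · exact absurd h.symm hbi
            · exact h
          · exact fun h => List.mem_cons_of_mem b h
        simp only [this]
        simp [hbn]

-- the whole scatter fold, observed at index i, is the gather filterMap
lemma get_scatter (L : List (Int × List Int)) (fl : List (List Int))
    (h : ∀ p ∈ L, p.2.Nodup ∧ ∀ b ∈ p.2, 0 ≤ b) (i : Nat) :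
    (L.foldl (fun fl p => p.2.foldl
        (fun fl2 b => fl2.modify b.toNat (fun ks => ks ++ [p.1])) fl) fl)[i]? =
      fl[i]?.map (fun ks => ks ++ L.filterMap (fun p => if (i : Int) ∈ p.2 then some p.1 else none)) := by
  induction L generalizing fl with
  | nil => cases hfl : fl[i]? <;> simp [hfl]
  | cons p L ih =>
      simp only [List.foldl_cons]
      rw [ih _ (fun q hq => h q (List.mem_cons_of_mem p hq))]
      have hp := h p (List.mem_cons_self ..)
      rw [get_inner p.2 p.1 fl hp.1 hp.2 i]
      by_cases hi : (i : Int) ∈ p.2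
      · simp [hi, Option.map_map]
        cases hfl : fl[i]? <;> simp
      · simp [hi]

-- facts about the combinations actually used
lemma combos_ok (n : Int) (k : Nat) (p : Int × List Int)
    (hp : p ∈ PySem.List.enumerate (pvCombinations (PySem.List.pyRange 0 n 1) k) 0) :
    p.2.Nodup ∧ ∀ b ∈ p.2, 0 ≤ b := by
  rw [PySem.List.mem_enumerate_iff] at hp
  obtain ⟨m, hm, rfl⟩ := hp
  have hsub := pvCombinations_sublist (PySem.List.pyRange 0 n 1) k _ (List.getElem_mem hm)
  constructor
  · exact ((PySem.List.pairwise_lt_pyRange_one 0 n).sublist hsub).imp (fun h => ne_of_lt h)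
  · intro b hb
    have := PySem.List.mem_pyRange_one.mp (hsub.subset hb)
    omega

-- ===== VERDICT (by name: the statement is the Claim_ definition above) =====
theorem solution_spec : Claim_equal_solution := by
  intro n r _ _
  unfold Spec_solution solution solution_alt
  simp only []
  apply List.ext_getElem?
  intro i
  set k := (n - r + 1).toNat with hk
  set C := pvCombinations (PySem.List.pyRange 0 n 1) k with hC
  -- rewrite A's range-indexed outer loop as a fold over the enumerated combos
  have henum : (PySem.List.pyRange 0 (C.length : Int) 1).foldl
      (fun fl a_key => (PySem.List.pyGetD C a_key []).foldl
        (fun fl2 b => fl2.modify b.toNat (fun ks => ks ++ [a_key])) fl)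
      ((PySem.List.pyRange 0 n 1).map (fun _ => ([] : List Int))) =
      (PySem.List.enumerate C 0).foldl
      (fun fl p => p.2.foldl
        (fun fl2 b => fl2.modify b.toNat (fun ks => ks ++ [p.1])) fl)
      ((PySem.List.pyRange 0 n 1).map (fun _ => ([] : List Int))) := by
    rw [show PySem.List.enumerate C 0 = PySem.List.enumerate C from rfl,
        PySem.List.enumerate_eq_map_pyRange C ([] : List Int), List.foldl_map]
    rfl
  rw [henum, get_scatter _ _ (fun p hp => combos_ok n k p hp) i]
  rw [List.getElem?_map, List.getElem?_map, PySem.List.getElem?_pyRange_one]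
  rw [← hC]
  simp
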